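-- pv_equiv track=rewrite | github.com/ELthomasoPostfix/Programming-Paradigms | Haskell/day18.py | dir_to_coords
-- ===== SOURCE A (Python) =====
-- directions = {
--     'U': (0, 1),
--     'R': (1, 0),
--     'D': (0, -1),
--     'L': (-1, 0),
-- }
--
-- def sign(x):
--     """The mathematical sign operation.
--
--     :param x: The number to evaluate
--     :return: -1 if x < 0, else +1
--     """
--     if x < 0: return -1
--     else: return 1
--
-- def dir_to_coords(cc, dir, dist):
--     """Perform a walk from the current coordinates in a given direction
--     for the given amount of distance. Produce a list of walked coordinates
--     in order.
--
--     The given direction must be one of the following: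
--         UP='U', RIGHT='R', DOWN='D', LEFT='L'
--     i.e. if cc=(0,0), dir='U', dist=3 then the result is
--         [(0,0), (0,1), (0,2), (0,3)]
--
--     :param cc: The current coordinates in the walk
--     :param dir: The direction to walk in
--     :param dist: The distance to walk
--     """
--     dist += 1
--     # The direction offset vector
--     do = directions[dir]
--     # The target coordinates
--     tc = (cc[0] + do[0] * dist, cc[1] + do[1] * dist)
--     # A bool to decide which of the xs or ys lists should be
--     # extended/padded to match the other in length
--     isXMove: bool = do[0] != 0
--
--     xCoords = [x for x in range(cc[0], tc[0], sign(tc[0] - cc[0]))]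
--     if not isXMove: xCoords = [cc[0]] * dist
--     yCoords = [y for y in range(cc[1], tc[1], sign(tc[1] - cc[1]))]
--     if isXMove: yCoords = [cc[1]] * dist
--     return [i for i in zip(xCoords, yCoords)]
-- ===== SOURCE B (Python) =====
-- directions = {
--     'U': (0, 1),
--     'R': (1, 0),
--     'D': (0, -1),
--     'L': (-1, 0),
-- }
--
-- def dir_to_coords(cc, dir, dist):
--     do = directions[dir]
--     return [(cc[0] + do[0] * i, cc[1] + do[1] * i) for i in range(dist + 1)]
-- ===== Notes on version B (the rewrite author's own statement) =====
-- stated objective: simpler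
-- what changed: B replaces A's sign-based range construction, list padding and zip of two coordinate lists by a single comprehension applying the direction offset scaled by the step index.
import Mathlib
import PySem

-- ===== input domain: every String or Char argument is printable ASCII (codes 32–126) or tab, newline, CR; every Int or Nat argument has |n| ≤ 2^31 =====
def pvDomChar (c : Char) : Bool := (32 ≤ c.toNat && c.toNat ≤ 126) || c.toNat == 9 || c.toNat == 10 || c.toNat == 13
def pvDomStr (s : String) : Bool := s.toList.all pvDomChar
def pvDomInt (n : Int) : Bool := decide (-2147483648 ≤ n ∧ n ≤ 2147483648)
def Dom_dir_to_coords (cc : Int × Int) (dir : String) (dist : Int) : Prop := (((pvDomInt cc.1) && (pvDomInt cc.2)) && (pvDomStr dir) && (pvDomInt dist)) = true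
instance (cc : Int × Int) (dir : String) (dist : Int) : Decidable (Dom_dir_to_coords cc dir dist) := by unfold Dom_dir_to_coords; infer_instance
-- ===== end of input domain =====

-- B builds the walked coordinates directly as offset·index in one comprehension,
-- replacing A's sign-based ranges, padding and zip (objective: simpler).

-- ===== PORT A =====
-- the module-level 'directions' dict
def pvDirections : PySem.Dict String (Int × Int) :=
  PySem.Dict.ofList [("U", (0, 1)), ("R", (1, 0)), ("D", (0, -1)), ("L", (-1, 0))]

-- sign(x)
def pySign (x : Int) : Int := if x < 0 then -1 else 1

def dir_to_coords (cc : Int × Int) (dir : String) (dist : Int) : List (Int × Int) :=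
  let dist := dist + 1
  -- directions[dir]: Pre_ guarantees the key is present; the default is unreachable then
  let dO := (PySem.Dict.get? pvDirections dir).getD (0, 0)
  let tc : Int × Int := (cc.1 + dO.1 * dist, cc.2 + dO.2 * dist)
  let isXMove : Bool := dO.1 != 0
  let xCoords := PySem.List.pyRange cc.1 tc.1 (pySign (tc.1 - cc.1))
  let xCoords := if isXMove then xCoords else List.replicate dist.toNat cc.1
  let yCoords := PySem.List.pyRange cc.2 tc.2 (pySign (tc.2 - cc.2))
  let yCoords := if isXMove then List.replicate dist.toNat cc.2 else yCoords
  xCoords.zip yCoords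

-- ===== PORT B =====
def dir_to_coords_alt (cc : Int × Int) (dir : String) (dist : Int) : List (Int × Int) :=
  let dO := (PySem.Dict.get? pvDirections dir).getD (0, 0)
  (PySem.List.pyRange 0 (dist + 1) 1).map (fun i => (cc.1 + dO.1 * i, cc.2 + dO.2 * i))

-- ===== PRECONDITION & SPEC =====
-- Pre_ excludes exactly the direction strings absent from 'directions', on which A raises KeyError.
def Pre_dir_to_coords (cc : Int × Int) (dir : String) (dist : Int) : Prop :=
  dir = "U" ∨ dir = "R" ∨ dir = "D" ∨ dir = "L"
instance (cc : Int × Int) (dir : String) (dist : Int) : Decidable (Pre_dir_to_coords cc dir dist) := by unfold Pre_dir_to_coords; infer_instance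
def pvWitness_dir_to_coords : (Int × Int) × String × Int := ((0, 0), "U", 3)

def Spec_dir_to_coords (cc : Int × Int) (dir : String) (dist : Int) (out : List (Int × Int)) : Prop := out = dir_to_coords_alt cc dir dist
instance (cc : Int × Int) (dir : String) (dist : Int) (out : List (Int × Int)) : Decidable (Spec_dir_to_coords cc dir dist out) := by unfold Spec_dir_to_coords; infer_instance

-- ===== CLAIM (what is proved, stated in full; the proofs are below) =====
def Claim_equal_dir_to_coords : Prop := ∀ (cc : Int × Int) (dir : String) (dist : Int), Dom_dir_to_coords cc dir dist → Pre_dir_to_coords cc dir dist → Spec_dir_to_coords cc dir dist (dir_to_coords cc dir dist)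

-- ===== LEMMAS AND PROOFS =====

-- zip of a range-map with a replicate of the same length
lemma zip_map_replicate (n : Nat) (f : Nat → Int) (c : Int) :
    ((List.range n).map f).zip (List.replicate n c) =
      (List.range n).map (fun k => (f k, c)) := by
  induction n with
  | zero => simp
  | succ m ih =>
    rw [List.range_succ, List.map_append, List.replicate_succ' (n := m),
      List.zip_append (by simp), ih, List.map_append]
    simp

lemma replicate_zip_map (n : Nat) (f : Nat → Int) (c : Int) :
    (List.replicate n c).zip ((List.range n).map f) =
      (List.range n).map (fun k => (c, f k)) := by
  induction n with
  | zero => simp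
  | succ m ih =>
    rw [List.range_succ, List.map_append, List.replicate_succ' (n := m),
      List.zip_append (by simp), ih, List.map_append]
    simp

-- B's comprehension in range-map form, one lemma per direction
lemma altU (cc : Int × Int) (dist : Int) :
    dir_to_coords_alt cc "U" dist
      = List.map (fun k : Nat => ((cc.1, cc.2 + (k:Int)) : Int × Int)) (List.range (dist+1).toNat) := by
  rw [dir_to_coords_alt,
    show (PySem.Dict.get? pvDirections "U").getD (0, 0) = ((0:Int),(1:Int)) from by decide,
    PySem.List.pyRange_one]
  rw [List.map_map, show dist + 1 - 0 = dist + 1 by ring]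
  refine List.map_congr_left fun k _ => ?_
  simp

lemma altR (cc : Int × Int) (dist : Int) :
    dir_to_coords_alt cc "R" dist
      = List.map (fun k : Nat => ((cc.1 + (k:Int), cc.2) : Int × Int)) (List.range (dist+1).toNat) := by
  rw [dir_to_coords_alt,
    show (PySem.Dict.get? pvDirections "R").getD (0, 0) = ((1:Int),(0:Int)) from by decide,
    PySem.List.pyRange_one]
  rw [List.map_map, show dist + 1 - 0 = dist + 1 by ring]
  refine List.map_congr_left fun k _ => ?_
  simp

lemma altD (cc : Int × Int) (dist : Int) :
    dir_to_coords_alt cc "D" dist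
      = List.map (fun k : Nat => ((cc.1, cc.2 - (k:Int)) : Int × Int)) (List.range (dist+1).toNat) := by
  rw [dir_to_coords_alt,
    show (PySem.Dict.get? pvDirections "D").getD (0, 0) = ((0:Int),(-1:Int)) from by decide,
    PySem.List.pyRange_one]
  rw [List.map_map, show dist + 1 - 0 = dist + 1 by ring]
  refine List.map_congr_left fun k _ => ?_
  simp; ring

lemma altL (cc : Int × Int) (dist : Int) :
    dir_to_coords_alt cc "L" dist
      = List.map (fun k : Nat => ((cc.1 - (k:Int), cc.2) : Int × Int)) (List.range (dist+1).toNat) := by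
  rw [dir_to_coords_alt,
    show (PySem.Dict.get? pvDirections "L").getD (0, 0) = ((-1:Int),(0:Int)) from by decide,
    PySem.List.pyRange_one]
  rw [List.map_map, show dist + 1 - 0 = dist + 1 by ring]
  refine List.map_congr_left fun k _ => ?_
  simp; ring

-- ===== VERDICT (by name: the statement is the Claim_ definition above) =====
theorem dir_to_coords_spec : Claim_equal_dir_to_coords := by
  intro cc dir dist _ hpre
  unfold Spec_dir_to_coords
  rcases hpre with h | h | h | h <;> subst h
  -- "U"
  · rw [altU]
    unfold dir_to_coords
    rw [show (PySem.Dict.get? pvDirections "U").getD (0, 0) = ((0:Int),(1:Int)) from by decide]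
    simp only [one_mul, zero_mul, add_zero, bne_self_eq_false, Bool.false_eq_true, if_false]
    by_cases hn : dist + 1 ≤ 0
    · simp [Int.toNat_of_nonpos hn]
    · rw [show pySign (cc.2 + (dist + 1) - cc.2) = 1 from by unfold pySign; omega,
        PySem.List.pyRange_one, show cc.2 + (dist + 1) - cc.2 = dist + 1 by ring,
        replicate_zip_map]
  -- "R"
  · rw [altR]
    unfold dir_to_coords
    rw [show (PySem.Dict.get? pvDirections "R").getD (0, 0) = ((1:Int),(0:Int)) from by decide]
    simp only [one_mul, zero_mul, add_zero, bne_iff_ne, ne_eq, one_ne_zero,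
      not_false_eq_true, if_true]
    by_cases hn : dist + 1 ≤ 0
    · simp [Int.toNat_of_nonpos hn]
    · rw [show pySign (cc.1 + (dist + 1) - cc.1) = 1 from by unfold pySign; omega,
        PySem.List.pyRange_one, show cc.1 + (dist + 1) - cc.1 = dist + 1 by ring,
        zip_map_replicate]
  -- "D"
  · rw [altD]
    unfold dir_to_coords
    rw [show (PySem.Dict.get? pvDirections "D").getD (0, 0) = ((0:Int),(-1:Int)) from by decide]
    simp only [neg_one_mul, zero_mul, add_zero, bne_self_eq_false, Bool.false_eq_true, if_false]
    by_cases hn : dist + 1 ≤ 0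
    · simp [Int.toNat_of_nonpos hn]
    · rw [show pySign (cc.2 + -(dist + 1) - cc.2) = -1 from by unfold pySign; omega,
        PySem.List.pyRange_neg_one, show cc.2 - (cc.2 + -(dist + 1)) = dist + 1 by ring,
        replicate_zip_map]
  -- "L"
  · rw [altL]
    unfold dir_to_coords
    rw [show (PySem.Dict.get? pvDirections "L").getD (0, 0) = ((-1:Int),(0:Int)) from by decide]
    simp only [neg_one_mul, zero_mul, add_zero, bne_iff_ne, ne_eq, neg_eq_zero, one_ne_zero,
      not_false_eq_true, if_true]
    by_cases hn : dist + 1 ≤ 0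
    · simp [Int.toNat_of_nonpos hn]
    · rw [show pySign (cc.1 + -(dist + 1) - cc.1) = -1 from by unfold pySign; omega,
        PySem.List.pyRange_neg_one, show cc.1 - (cc.1 + -(dist + 1)) = dist + 1 by ring,
        zip_map_replicate]
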